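-- pv_equiv track=rewrite | github.com/mire403/Paper2Post | pdf_loader.py | _normalize_pdf_text
-- ===== SOURCE A (Python) =====
-- from typing import List
--
-- def _normalize_pdf_text(s: str) -> str:
--     # Basic cleanup for common PDF artifacts.
--     s = s.replace("\r\n", "\n").replace("\r", "\n")
--     # Remove excessive spaces.
--     lines = [line.strip() for line in s.split("\n")]
--     # Join hyphenated line breaks: "trans-\nformer" -> "transformer"
--     merged: List[str] = []
--     for line in lines:
--         if not line:
--             merged.append("")
--             continue
--         if merged and merged[-1].endswith("-") and line and line[0].islower():
--             merged[-1] = merged[-1][:-1] + line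
--         else:
--             merged.append(line)
--     # Collapse 3+ blank lines.
--     out_lines: List[str] = []
--     blank = 0
--     for line in merged:
--         if line == "":
--             blank += 1
--             if blank <= 2:
--                 out_lines.append(line)
--         else:
--             blank = 0
--             out_lines.append(line)
--     return "\n".join(out_lines).strip()
-- ===== SOURCE B (Python) =====
-- def _normalize_pdf_text(s: str) -> str:
--     # One fused pass: strip each line, merge hyphenated breaks and collapse
--     # 3+ blank lines while building a single output list.
--     s = s.replace("\r\n", "\n").replace("\r", "\n")
--     out = []
--     blank = 0
--     for raw in s.split("\n"):
--         line = raw.strip()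
--         if not line:
--             blank += 1
--             if blank <= 2:
--                 out.append("")
--         else:
--             if out and out[-1].endswith("-") and line[0].islower():
--                 out[-1] = out[-1][:-1] + line
--             else:
--                 out.append(line)
--             blank = 0
--     return "\n".join(out).strip()
-- ===== Notes on version B (the rewrite author's own statement) =====
-- stated objective: alternative
-- what changed: A's three passes (strip comprehension, hyphen-merge loop, blank-collapse loop over a second intermediate list) are fused into one loop that strips, merges and collapses while tracking a blank-run counter, building the output list directly with no intermediate lists.
import Mathlib
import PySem

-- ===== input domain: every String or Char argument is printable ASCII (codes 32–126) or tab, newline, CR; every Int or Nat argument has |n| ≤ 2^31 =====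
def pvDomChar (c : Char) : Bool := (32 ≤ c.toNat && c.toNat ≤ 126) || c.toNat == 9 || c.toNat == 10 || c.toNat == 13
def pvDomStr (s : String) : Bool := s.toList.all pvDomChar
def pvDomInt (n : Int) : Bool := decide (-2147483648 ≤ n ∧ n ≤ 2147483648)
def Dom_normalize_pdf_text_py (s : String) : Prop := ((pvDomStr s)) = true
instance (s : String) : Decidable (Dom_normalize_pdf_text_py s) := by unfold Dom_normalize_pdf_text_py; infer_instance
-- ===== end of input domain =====

-- B fuses A's strip pass, hyphen-merge loop and blank-collapse loop into one loop (alternative decomposition, same cost).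

-- ===== PORT A =====
-- `line and line[0].islower()` for a line (nonempty lines only reach it, [] → false)
def pvFirstLower (line : List Char) : Bool :=
  match line with
  | c :: _ => PySem.Chars.islower c
  | [] => false

-- one step of A's hyphen-merge loop; merged[-1][:-1] is List.dropLast (exact: drops the last char, [] stays [])
def pvMergeStep (merged : List (List Char)) (line : List Char) : List (List Char) :=
  if line = [] then merged ++ [[]]
  else
    match merged.getLast? with
    | some last =>
        if PySem.Chars.endswith last ['-'] && pvFirstLower line then
          merged.dropLast ++ [last.dropLast ++ line]
        else merged ++ [line]
    | none => merged ++ [line]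

-- one step of A's blank-collapse loop, state = (out_lines, blank)
def pvCollapseStep (acc : List (List Char) × Nat) (line : List Char) : List (List Char) × Nat :=
  if line = [] then
    if acc.2 + 1 ≤ 2 then (acc.1 ++ [[]], acc.2 + 1) else (acc.1, acc.2 + 1)
  else (acc.1 ++ [line], 0)

def normalize_pdf_text_py (s : String) : String :=
  let cs := PySem.Chars.replace (PySem.Chars.replace s.toList ['\r', '\n'] ['\n']) ['\r'] ['\n']
  let lines := (PySem.Chars.splitOn cs ['\n']).map PySem.Chars.strip
  let merged := lines.foldl pvMergeStep []
  let out := (merged.foldl pvCollapseStep ([], 0)).1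
  String.ofList (PySem.Chars.strip (PySem.Chars.join ['\n'] out))

-- ===== PORT B =====
-- the body of B's single fused loop, applied to the already-stripped line
def pvFusedStep (acc : List (List Char) × Nat) (line : List Char) : List (List Char) × Nat :=
  if line = [] then
    if acc.2 + 1 ≤ 2 then (acc.1 ++ [[]], acc.2 + 1) else (acc.1, acc.2 + 1)
  else
    match acc.1.getLast? with
    | some last =>
        if PySem.Chars.endswith last ['-'] && pvFirstLower line then
          (acc.1.dropLast ++ [last.dropLast ++ line], 0)
        else (acc.1 ++ [line], 0)
    | none => (acc.1 ++ [line], 0)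

def normalize_pdf_text_py_alt (s : String) : String :=
  let cs := PySem.Chars.replace (PySem.Chars.replace s.toList ['\r', '\n'] ['\n']) ['\r'] ['\n']
  let out := ((PySem.Chars.splitOn cs ['\n']).foldl
      (fun acc raw => pvFusedStep acc (PySem.Chars.strip raw)) ([], 0)).1
  String.ofList (PySem.Chars.strip (PySem.Chars.join ['\n'] out))

-- ===== PRECONDITION & SPEC =====
def Spec_normalize_pdf_text_py (s : String) (out : String) : Prop := out = normalize_pdf_text_py_alt s
instance (s : String) (out : String) : Decidable (Spec_normalize_pdf_text_py s out) := by unfold Spec_normalize_pdf_text_py; infer_instance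

-- ===== CLAIM (what is proved, stated in full; the proofs are below) =====
def Claim_equal_normalize_pdf_text_py : Prop := ∀ (s : String), Dom_normalize_pdf_text_py s → Spec_normalize_pdf_text_py s (normalize_pdf_text_py s)

-- ===== LEMMAS AND PROOFS =====

-- A's collapse fold from the initial state, as a function of the merged list
def pvC (m : List (List Char)) : List (List Char) × Nat := m.foldl pvCollapseStep ([], 0)

lemma pvC_append (m : List (List Char)) (l : List Char) :
    pvC (m ++ [l]) = pvCollapseStep (pvC m) l := by
  simp [pvC, List.foldl_append]

-- invariant of the collapse state: blank = 0 ⇒ out and merged end in the same (nonempty) line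
-- (or both are empty); blank ≠ 0 ⇒ out ends with the empty line
lemma pvC_inv (m : List (List Char)) :
    ((pvC m).2 = 0 →
      ((pvC m).1 = [] ∧ m = []) ∨
      (∃ l, l ≠ [] ∧ m.getLast? = some l ∧ (pvC m).1.getLast? = some l)) ∧
    ((pvC m).2 ≠ 0 → (pvC m).1.getLast? = some []) := by
  induction m using List.reverseRecOn with
  | nil => simp [pvC]
  | append_singleton m l ih =>
    rw [pvC_append]
    by_cases hl : l = []
    · subst hl
      simp only [pvCollapseStep]
      by_cases hb : (pvC m).2 + 1 ≤ 2
      · simp [hb]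
      · have h2 : (pvC m).2 ≠ 0 := by omega
        simp only [if_neg hb]
        refine ⟨fun h => ?_, fun _ => ih.2 h2⟩
        simp at h
    · simp only [pvCollapseStep, if_neg hl]
      refine ⟨fun _ => Or.inr ⟨l, hl, ?_, ?_⟩, fun h => absurd rfl h⟩
      · simp
      · simp

-- the per-line commutation: B's fused step on the collapse state equals
-- collapsing after A's merge step
lemma pvStep_comm (m : List (List Char)) (line : List Char) :
    pvFusedStep (pvC m) line = pvC (pvMergeStep m line) := by
  by_cases hl : line = []
  · subst hl
    rw [pvMergeStep, if_pos rfl, pvC_append]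
    rfl
  · rcases hm : m.getLast? with _ | last
    · -- m = [], A appends; B's out is empty too
      have hmnil : m = [] := by simpa using hm
      subst hmnil
      simp [pvMergeStep, pvFusedStep, pvC, pvCollapseStep, hl]
    · have hdec : m = m.dropLast ++ [last] := Eq.symm (List.dropLast_append_getLast? last hm)
      by_cases hcond : PySem.Chars.endswith last ['-'] && pvFirstLower line
      · -- merge case: last ≠ [] (it ends with '-'), so pvC m ends with last and blank = 0
        have hlast : last ≠ [] := by
          intro h; subst h
          simp [PySem.Chars.endswith] at hcond
        have hCm : pvC m = ((pvC m.dropLast).1 ++ [last], 0) := by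
          conv_lhs => rw [hdec]
          rw [pvC_append, pvCollapseStep, if_neg hlast]
        have hA : pvMergeStep m line = m.dropLast ++ [last.dropLast ++ line] := by
          rw [pvMergeStep, if_neg hl, hm]
          simp [hcond]
        have hsp : last.dropLast ++ line ≠ [] := by simp [hl]
        rw [hA, pvC_append, pvCollapseStep, if_neg hsp, pvFusedStep, if_neg hl, hCm]
        simp [hcond]
      · -- no-merge case: B's merge condition is also false on the collapse state
        have hA : pvMergeStep m line = m ++ [line] := by
          rw [pvMergeStep, if_neg hl, hm]
          simp [hcond]
        rw [hA, pvC_append, pvCollapseStep, if_neg hl, pvFusedStep, if_neg hl]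
        rcases ho : (pvC m).1.getLast? with _ | last'
        · simp
        · have hno : ¬ (PySem.Chars.endswith last' ['-'] && pvFirstLower line) = true := by
            intro hyes
            by_cases hb : (pvC m).2 = 0
            · rcases (pvC_inv m).1 hb with ⟨_, hm0⟩ | ⟨l, hlne, hml, hol⟩
              · rw [hm0] at hm; simp at hm
              · rw [ho] at hol
                have h1 : last' = l := by injection hol
                have h2 : last = l := by
                  have := hm.symm.trans hml
                  injection this
                rw [h1, ← h2] at hyes
                exact hcond hyes
            · have h3 := (pvC_inv m).2 hb
              rw [ho] at h3
              have : last' = ([] : List Char) := by injection h3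
              subst this
              simp [PySem.Chars.endswith] at hyes
          simp [hno]

-- fused fold over raw lines = collapse of A's merge fold over stripped lines
lemma pvFold_comm (ls : List (List Char)) (m : List (List Char)) :
    ls.foldl (fun acc raw => pvFusedStep acc (PySem.Chars.strip raw)) (pvC m) =
      pvC (ls.foldl (fun acc raw => pvMergeStep acc (PySem.Chars.strip raw)) m) := by
  induction ls generalizing m with
  | nil => rfl
  | cons raw ls ih =>
    simp only [List.foldl_cons]
    rw [pvStep_comm]
    exact ih _

-- ===== VERDICT (by name: the statement is the Claim_ definition above) =====
theorem normalize_pdf_text_py_spec : Claim_equal_normalize_pdf_text_py := by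
  intro s _
  unfold Spec_normalize_pdf_text_py normalize_pdf_text_py normalize_pdf_text_py_alt
  simp only [List.foldl_map]
  have h := pvFold_comm
      (PySem.Chars.splitOn (PySem.Chars.replace (PySem.Chars.replace s.toList ['\r', '\n'] ['\n']) ['\r'] ['\n']) ['\n']) []
  simp only [pvC, List.foldl_nil] at h
  rw [h]
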